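-- pv_equiv track=rewrite | github.com/kevint96/Inventario-OSB | extract_osb_services9.py | es_operacion_clave_valor
-- ===== SOURCE A (Python) =====
-- def es_operacion_clave_valor(grouped_data):
--     # Iterar sobre los valores del diccionario
--     for value in grouped_data.values():
--         # Si algún valor no es una lista, retorna False
--         if not isinstance(value, list):
--             return False
--         # Si algún elemento de la lista no es un diccionario, retorna False
--         if not all(isinstance(item, dict) for item in value):
--             return False
--         # Si algún diccionario tiene más de un elemento, retorna False
--         if any(len(item) != 1 for item in value):
--             return False
--         # Si algún diccionario no tiene una cadena como valor, retorna False
--         if not all(isinstance(list(item.values())[0], str) for item in value):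
--             return False
--     # Si todos los valores son listas de diccionarios con un solo elemento, retorna True
--     return True
-- ===== SOURCE B (Python) =====
-- def es_operacion_clave_valor(grouped_data):
--     # Single fused pass: on well-typed input (dict of lists of dicts with string
--     # values) the isinstance checks of A are always true, so the structure is
--     # valid exactly when every inner dict has exactly one entry.
--     return all(len(item) == 1
--                for value in grouped_data.values()
--                for item in value)
-- ===== Notes on version B (the rewrite author's own statement) =====
-- stated objective: simpler
-- what changed: A's per-list early-return loop with three separate all/any scans (type checks plus a length check) is replaced by one flat fused comprehension: on the typed domain a single 'all(len(item)==1 ...)' over all items of all values is equivalent.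
import Mathlib
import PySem

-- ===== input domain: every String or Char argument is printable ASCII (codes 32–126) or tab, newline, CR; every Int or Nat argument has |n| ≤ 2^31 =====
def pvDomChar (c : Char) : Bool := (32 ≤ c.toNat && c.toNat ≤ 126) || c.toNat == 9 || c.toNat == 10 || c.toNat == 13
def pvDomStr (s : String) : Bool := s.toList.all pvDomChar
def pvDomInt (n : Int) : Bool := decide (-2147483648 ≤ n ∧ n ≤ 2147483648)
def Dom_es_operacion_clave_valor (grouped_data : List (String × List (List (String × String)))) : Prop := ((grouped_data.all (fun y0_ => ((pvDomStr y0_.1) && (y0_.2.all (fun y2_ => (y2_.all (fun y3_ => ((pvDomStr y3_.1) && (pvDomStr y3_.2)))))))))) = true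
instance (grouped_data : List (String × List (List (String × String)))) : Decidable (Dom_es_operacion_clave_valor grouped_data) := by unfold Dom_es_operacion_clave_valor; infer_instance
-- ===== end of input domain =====

-- B fuses A's per-list early-return loop with three separate scans into one flat
-- nested `all` over all items (simpler; same behaviour on the typed domain).


-- ===== PORT A =====
-- A's `for value in grouped_data.values()` loop with early returns, as structural
-- recursion over the values list.  Under the type convention `value` is always a
-- list and every `item` is a dict with String values, so the two isinstance scans
-- are scans whose predicate is constantly true; `len(item)` is the number of
-- distinct keys of the dict (the assoc list may repeat keys).  The access
-- `list(item.values())[0]` sits behind the len == 1 check, so it never raises.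
def esLoopA : List (List (List (String × String))) → Bool
  | [] => true
  | v :: rest =>
    if !(v.all fun _item => true) then false            -- all(isinstance(item, dict) ...)
    else if v.any (fun item => (PySem.Dict.ofList item).size != 1) then false
    else if !(v.all fun _item => true) then false       -- all(isinstance(values[0], str) ...)
    else esLoopA rest

def es_operacion_clave_valor (grouped_data : List (String × List (List (String × String)))) : Bool :=
  esLoopA (PySem.Dict.ofList grouped_data).values

-- ===== PORT B =====
def es_operacion_clave_valor_alt (grouped_data : List (String × List (List (String × String)))) : Bool :=
  (PySem.Dict.ofList grouped_data).values.all fun value =>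
    value.all fun item => (PySem.Dict.ofList item).size == 1

-- ===== PRECONDITION & SPEC =====
def Spec_es_operacion_clave_valor (grouped_data : List (String × List (List (String × String)))) (out : Bool) : Prop := out = es_operacion_clave_valor_alt grouped_data
instance (grouped_data : List (String × List (List (String × String)))) (out : Bool) : Decidable (Spec_es_operacion_clave_valor grouped_data out) := by unfold Spec_es_operacion_clave_valor; infer_instance

-- ===== CLAIM (what is proved, stated in full; the proofs are below) =====
def Claim_equal_es_operacion_clave_valor : Prop := ∀ (grouped_data : List (String × List (List (String × String)))), Dom_es_operacion_clave_valor grouped_data → Spec_es_operacion_clave_valor grouped_data (es_operacion_clave_valor grouped_data)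

-- ===== LEMMAS AND PROOFS =====
theorem esLoopA_eq_all (l : List (List (List (String × String)))) :
    esLoopA l = l.all fun v => v.all fun item => (PySem.Dict.ofList item).size == 1 := by
  induction l with
  | nil => rfl
  | cons v rest ih =>
    cases hv : v.any (fun item => (PySem.Dict.ofList item).size != 1) with
    | false =>
      have hall : v.all (fun item => (PySem.Dict.ofList item).size == 1) = true := by
        simp only [List.any_eq_false] at hv
        simp only [List.all_eq_true]
        intro x hx
        simpa using hv x hx
      simp [esLoopA, hv, hall, ih]
    | true =>
      have hall : v.all (fun item => (PySem.Dict.ofList item).size == 1) = false := by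
        simp only [List.any_eq_true] at hv
        obtain ⟨x, hx, hp⟩ := hv
        simp only [List.all_eq_false]
        exact ⟨x, hx, by simpa using hp⟩
      simp [esLoopA, hv, hall]

-- ===== VERDICT (by name: the statement is the Claim_ definition above) =====
theorem es_operacion_clave_valor_spec : Claim_equal_es_operacion_clave_valor := by
  intro g _
  unfold Spec_es_operacion_clave_valor es_operacion_clave_valor es_operacion_clave_valor_alt
  exact esLoopA_eq_all _
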